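-- pv_equiv track=rewrite | github.com/persona613/leetcode_practices | 1196. How Many Apples Can You Put into the Basket.py | maxNumberOfApples
-- ===== SOURCE A (Python) =====
-- from typing import List
--
-- def maxNumberOfApples(weight: List[int]) -> int:
--     app = sorted(weight)
--     ans = 0
--     wt = 5000
--     for a in app:
--         if a > wt:
--             break
--         wt -= a
--         ans += 1
--     return ans
-- ===== SOURCE B (Python) =====
-- def maxNumberOfApples(weight):
--     counts = {}
--     for w in weight:
--         counts[w] = counts.get(w, 0) + 1
--     ans = 0
--     wt = 5000
--     for w in sorted(counts):
--         c = counts[w]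
--         if w <= 0:
--             wt -= w * c
--             ans += c
--         else:
--             k = min(c, wt // w)
--             ans += k
--             wt -= k * w
--             if k < c:
--                 break
--     return ans
-- ===== Notes on version B (the rewrite author's own statement) =====
-- stated objective: alternative
-- what changed: B replaces A's sort-then-per-element scan by a counter dict: it groups equal weights, sorts only the distinct weights, and takes each group in bulk with one floor division (min(c, wt//w)) instead of c individual subtractions.
import Mathlib
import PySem

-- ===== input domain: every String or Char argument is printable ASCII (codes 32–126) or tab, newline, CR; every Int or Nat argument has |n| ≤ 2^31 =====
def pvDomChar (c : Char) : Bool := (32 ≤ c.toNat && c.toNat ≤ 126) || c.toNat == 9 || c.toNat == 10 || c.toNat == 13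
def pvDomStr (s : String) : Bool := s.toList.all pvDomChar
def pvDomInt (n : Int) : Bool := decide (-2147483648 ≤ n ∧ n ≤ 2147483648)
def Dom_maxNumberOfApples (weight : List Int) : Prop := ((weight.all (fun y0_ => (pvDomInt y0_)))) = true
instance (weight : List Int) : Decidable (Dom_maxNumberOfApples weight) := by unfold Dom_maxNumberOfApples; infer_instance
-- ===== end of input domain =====

-- B groups equal weights with a counter dict and takes each group in bulk with one floor
-- division, instead of A's per-element scan of the full sorted list (objective: alternative).

-- ===== PORT A =====
-- the 'for a in app: if a > wt: break; wt -= a; ans += 1' loop of A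
def goA : List Int → Int → Int → Int
  | [], _, ans => ans
  | a :: t, wt, ans => if a > wt then ans else goA t (wt - a) (ans + 1)

def maxNumberOfApples (weight : List Int) : Int :=
  goA (PySem.List.sorted weight (fun x => x) false) 5000 0

-- ===== PORT B =====
-- the 'for w in sorted(counts): …' loop of B, with its bulk take and break
def goB (counts : PySem.Dict Int Int) : List Int → Int → Int → Int
  | [], _, ans => ans
  | w :: t, wt, ans =>
    let c := counts.getD w 0
    if w ≤ 0 then goB counts t (wt - w * c) (ans + c)
    else
      let k := min c (PySem.Int.floordiv wt w)
      if k < c then ans + k else goB counts t (wt - k * w) (ans + k)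

def maxNumberOfApples_alt (weight : List Int) : Int :=
  let counts := weight.foldl (fun d x => d.insert x (d.getD x 0 + 1)) PySem.Dict.empty
  goB counts (PySem.List.sorted counts.keys (fun x => x) false) 5000 0

-- ===== PRECONDITION & SPEC =====
def Spec_maxNumberOfApples (weight : List Int) (out : Int) : Prop := out = maxNumberOfApples_alt weight
instance (weight : List Int) (out : Int) : Decidable (Spec_maxNumberOfApples weight out) := by unfold Spec_maxNumberOfApples; infer_instance

-- ===== CLAIM (what is proved, stated in full; the proofs are below) =====
def Claim_equal_maxNumberOfApples : Prop := ∀ (weight : List Int), Dom_maxNumberOfApples weight → Spec_maxNumberOfApples weight (maxNumberOfApples weight)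

-- ===== LEMMAS AND PROOFS =====

-- A block of c copies of a nonpositive weight is always taken whole.
theorem goA_replicate_nonpos (c : Nat) (w : Int) (hw : w ≤ 0) :
    ∀ (rest : List Int) (wt ans : Int), 0 ≤ wt →
      goA (List.replicate c w ++ rest) wt ans = goA rest (wt - w * c) (ans + c) := by
  induction c with
  | zero => intro rest wt ans _; simp
  | succ c ih =>
    intro rest wt ans hwt
    rw [List.replicate_succ]
    simp only [List.cons_append, goA]
    rw [if_neg (by omega), ih rest (wt - w) (ans + 1) (by omega)]
    have e1 : wt - w - w * (c : Int) = wt - w * ((c : Nat) + 1 : Int) := by ring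
    have e2 : ans + 1 + (c : Int) = ans + ((c : Nat) + 1 : Int) := by ring
    push_cast
    rw [e1, e2]

-- A block of c copies of a positive weight: A takes exactly min c (wt // w) of them.
theorem goA_replicate_pos (c : Nat) (w : Int) (hw : 0 < w) :
    ∀ (rest : List Int) (wt ans : Int), 0 ≤ wt →
      goA (List.replicate c w ++ rest) wt ans =
        (if min (c : Int) (PySem.Int.floordiv wt w) < (c : Int) then
            ans + min (c : Int) (PySem.Int.floordiv wt w)
          else goA rest (wt - min (c : Int) (PySem.Int.floordiv wt w) * w)
            (ans + min (c : Int) (PySem.Int.floordiv wt w))) := by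
  induction c with
  | zero =>
    intro rest wt ans hwt
    have hq : 0 ≤ PySem.Int.floordiv wt w := by
      rw [PySem.Int.floordiv_eq_ediv_of_pos hw]; exact Int.ediv_nonneg hwt (le_of_lt hw)
    have hm : min ((0 : Nat) : Int) (PySem.Int.floordiv wt w) = 0 := by omega
    rw [hm, if_neg (by omega)]
    simp
  | succ c ih =>
    intro rest wt ans hwt
    rw [List.replicate_succ]
    simp only [List.cons_append, goA]
    rw [PySem.Int.floordiv_eq_ediv_of_pos hw]
    by_cases hgt : w > wt
    · rw [if_pos hgt]
      have hq : wt / w = 0 := Int.ediv_eq_zero_of_lt hwt hgt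
      rw [hq]
      have hm : min ((c + 1 : Nat) : Int) 0 = 0 := by push_cast; omega
      rw [hm, if_pos (by push_cast; omega)]
      ring
    · rw [if_neg hgt]
      have hq1 : 1 ≤ wt / w := by rw [Int.le_ediv_iff_mul_le hw]; omega
      rw [ih rest (wt - w) (ans + 1) (by omega)]
      rw [PySem.Int.floordiv_eq_ediv_of_pos hw]
      have hstep : (wt - w) / w = wt / w - 1 := by
        have := Int.add_mul_ediv_right wt (-1) (show w ≠ 0 by omega)
        have e : wt + -1 * w = wt - w := by ring
        rw [e] at this; omega
      rw [hstep]
      have hk : min ((c + 1 : Nat) : Int) (wt / w) = min (c : Int) (wt / w - 1) + 1 := by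
        push_cast; omega
      rw [hk]
      have hcond : (min (c : Int) (wt / w - 1) + 1 < ((c + 1 : Nat) : Int))
          ↔ (min (c : Int) (wt / w - 1) < (c : Int)) := by push_cast; omega
      by_cases hlt : min (c : Int) (wt / w - 1) < (c : Int)
      · rw [if_pos hlt, if_pos (hcond.mpr hlt)]; ring
      · rw [if_neg hlt, if_neg (fun h => hlt (hcond.mp h))]
        have e1 : wt - w - min (c : Int) (wt / w - 1) * w
            = wt - (min (c : Int) (wt / w - 1) + 1) * w := by ring
        have e2 : ans + 1 + min (c : Int) (wt / w - 1)
            = ans + (min (c : Int) (wt / w - 1) + 1) := by ring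
        rw [e1, e2]

-- main loop correspondence over any key list
theorem goA_flatMap_eq_goB (weight : List Int) :
    ∀ (ks : List Int) (wt ans : Int), 0 ≤ wt →
      goA (ks.flatMap fun w => List.replicate (weight.count w) w) wt ans
        = goB (PySem.Dict.counter weight) ks wt ans := by
  intro ks
  induction ks with
  | nil => intro wt ans _; rfl
  | cons w t ih =>
    intro wt ans hwt
    have hc0 : (0 : Int) ≤ (weight.count w : Int) := Int.natCast_nonneg _
    simp only [List.flatMap_cons, goB, PySem.Dict.getD_counter]
    by_cases hw : w ≤ 0
    · rw [if_pos hw, goA_replicate_nonpos _ _ hw _ _ _ hwt]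
      exact ih _ _ (by nlinarith)
    · rw [if_neg hw, goA_replicate_pos _ _ (by omega) _ _ _ hwt]
      by_cases hlt : min ((weight.count w : Nat) : Int) (PySem.Int.floordiv wt w)
          < ((weight.count w : Nat) : Int)
      · rw [if_pos hlt, if_pos hlt]
      · rw [if_neg hlt, if_neg hlt]
        refine ih _ _ ?_
        have hwpos : (0 : Int) < w := by omega
        rw [PySem.Int.floordiv_eq_ediv_of_pos hwpos]
        have h1 : wt / w * w ≤ wt := Int.ediv_mul_le wt (by omega)
        have h2 : min ((weight.count w : Nat) : Int) (wt / w) ≤ wt / w := min_le_right _ _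
        nlinarith

theorem count_flatMap_replicate (f : Int → Nat) :
    ∀ (ks : List Int), ks.Nodup → ∀ a : Int,
      (ks.flatMap fun w => List.replicate (f w) w).count a = if a ∈ ks then f a else 0 := by
  intro ks
  induction ks with
  | nil => intro _ a; simp
  | cons w t ih =>
    intro hnd a
    rw [List.flatMap_cons, List.count_append, List.count_replicate, ih hnd.of_cons a]
    by_cases haw : a = w
    · subst haw
      have : a ∉ t := (List.nodup_cons.mp hnd).1
      simp [this]
    · have hne : (w == a) = false := by
        simp [show ¬ w = a from fun h => haw h.symm]
      simp [hne, List.mem_cons, haw]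

theorem pairwise_flatMap_replicate (f : Int → Nat) :
    ∀ (ks : List Int), ks.Pairwise (· < ·) →
      (ks.flatMap fun w => List.replicate (f w) w).Pairwise (· ≤ ·) := by
  intro ks
  induction ks with
  | nil => intro _; simp
  | cons w t ih =>
    intro hp
    rw [List.flatMap_cons]
    refine List.pairwise_append.mpr ⟨List.pairwise_replicate.mpr (by simp), ih hp.of_cons, ?_⟩
    intro x hx y hy
    obtain ⟨k, hk, hyk⟩ := List.mem_flatMap.mp hy
    rw [List.eq_of_mem_replicate hx, List.eq_of_mem_replicate hyk]
    exact le_of_lt (List.rel_of_pairwise_cons hp hk)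

-- sorted(weight) is the sorted distinct weights, each repeated its multiplicity
theorem sorted_eq_flatMap (weight : List Int) :
    PySem.List.sorted weight (fun x => x) false
      = (PySem.List.sorted (PySem.Set.ofList weight) (fun x => x) false).flatMap
          (fun w => List.replicate (weight.count w) w) := by
  have hperm := PySem.List.sorted_perm (PySem.Set.ofList weight) (fun x => x) false
  have hnd : (PySem.List.sorted (PySem.Set.ofList weight) (fun x => x) false).Nodup :=
    List.Perm.nodup (List.Perm.symm hperm) (PySem.Set.nodup_ofList weight)
  apply PySem.List.sorted_id_eq_of_perm_of_pairwise
  · rw [List.perm_iff_count]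
    intro a
    rw [count_flatMap_replicate _ _ hnd a]
    by_cases ha : a ∈ weight
    · simp [PySem.List.mem_sorted, PySem.Set.mem_ofList, ha]
    · simp [PySem.List.mem_sorted, PySem.Set.mem_ofList, ha, List.count_eq_zero.mpr ha]
  · exact pairwise_flatMap_replicate _ _ (PySem.List.sorted_ofList_pairwise_lt weight)

-- ===== VERDICT (by name: the statement is the Claim_ definition above) =====
theorem maxNumberOfApples_spec : Claim_equal_maxNumberOfApples := by
  intro weight _
  show maxNumberOfApples weight = maxNumberOfApples_alt weight
  have hB : maxNumberOfApples_alt weight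
      = goB (PySem.Dict.counter weight)
          (PySem.List.sorted (PySem.Dict.counter weight).keys (fun x => x) false) 5000 0 := rfl
  rw [hB, PySem.Dict.keys_counter]
  unfold maxNumberOfApples
  rw [sorted_eq_flatMap, goA_flatMap_eq_goB weight _ 5000 0 (by norm_num)]
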